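-- pv_equiv track=rewrite | github.com/Rasmus0505/ES-Deploy | backend/vendor/videolingo_subtitle_core/vl_flow/split_meaning.py | _remap_positions_to_original
-- ===== SOURCE A (Python) =====
-- def _remap_positions_to_original(original: str, compact_positions: list[int]) -> list[int]:
--     if not compact_positions:
--         return []
--
--     mapping: list[int] = []
--     compact_index = 0
--     for raw_index, char in enumerate(original):
--         if char.isspace():
--             continue
--         compact_index += 1
--         while compact_positions and compact_index == compact_positions[0]:
--             mapping.append(raw_index + 1)
--             compact_positions.pop(0)
--             if not compact_positions:
--                 return mapping
--     return mapping
-- ===== SOURCE B (Python) =====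
-- def _remap_positions_to_original(original: str, compact_positions: list[int]) -> list[int]:
--     nonspace = [i for i, ch in enumerate(original) if not ch.isspace()]
--     m = len(nonspace)
--     length = 0
--     prev = 1
--     for p in compact_positions:
--         if prev <= p <= m:
--             prev = p
--             length += 1
--         else:
--             break
--     result = [nonspace[p - 1] + 1 for p in compact_positions[:length]]
--     del compact_positions[:length]
--     return result
-- ===== Notes on version B (the rewrite author's own statement) =====
-- stated objective: alternative
-- what changed: Instead of interleaving a walk over the string with a head-popping while loop, B builds the non-space index table once, computes in one scan the length of the surviving prefix of compact_positions (non-decreasing, each within [1, m]), and gathers the answer by direct table lookup; the same elements are deleted from compact_positions to keep A's observable mutation.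
import Mathlib
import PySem

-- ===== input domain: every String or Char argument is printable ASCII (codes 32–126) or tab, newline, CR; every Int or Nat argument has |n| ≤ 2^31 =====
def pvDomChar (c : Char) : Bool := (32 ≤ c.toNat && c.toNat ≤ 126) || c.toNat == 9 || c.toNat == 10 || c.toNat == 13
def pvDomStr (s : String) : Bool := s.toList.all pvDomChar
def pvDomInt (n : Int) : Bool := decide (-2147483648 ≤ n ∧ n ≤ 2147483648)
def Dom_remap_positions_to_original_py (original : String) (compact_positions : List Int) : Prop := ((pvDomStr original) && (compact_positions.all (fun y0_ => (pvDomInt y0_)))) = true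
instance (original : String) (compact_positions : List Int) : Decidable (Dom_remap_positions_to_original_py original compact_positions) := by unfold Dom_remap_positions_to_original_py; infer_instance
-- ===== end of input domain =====

-- B replaces A's interleaved string-walk + head-popping while loop by a non-space index
-- table, a single prefix-length scan and a gather (objective: alternative decomposition).
-- Both Pythons mutate compact_positions (A pops the matched heads, B deletes the same
-- prefix — identical effect); the Lean equivalence is about the RETURN value.

-- ===== PORT A =====
-- inner 'while compact_positions and compact_index == compact_positions[0]': returns
-- (mapping, remaining compact_positions); the python's early 'return mapping' when the
-- list empties is realised by the emptiness test after the call (same value: an empty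
-- list can never match again).
def pvDrainA (raw : Int) (ci : Int) (cps : List Int) (mapping : List Int) : List Int × List Int :=
  match cps with
  | [] => (mapping, [])
  | p :: rest => if ci = p then pvDrainA raw ci rest (mapping ++ [raw + 1]) else (mapping, p :: rest)

def pvGoA (chars : List (Int × Char)) (ci : Int) (cps : List Int) (mapping : List Int) : List Int :=
  match chars with
  | [] => mapping
  | (raw, c) :: rest =>
    if PySem.Chars.isspace c then pvGoA rest ci cps mapping
    else
      let ci' := ci + 1
      let r := pvDrainA raw ci' cps mapping
      if r.2 = [] then r.1 else pvGoA rest ci' r.2 r.1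

def remap_positions_to_original_py (original : String) (compact_positions : List Int) : List Int :=
  if compact_positions = [] then []
  else pvGoA (PySem.List.enumerate original.toList) 0 compact_positions []

-- ===== PORT B =====
def pvPrefLen (prevv : Int) (m : Int) (cps : List Int) : Nat :=
  match cps with
  | [] => 0
  | p :: rest => if prevv ≤ p ∧ p ≤ m then 1 + pvPrefLen p m rest else 0

def remap_positions_to_original_py_alt (original : String) (compact_positions : List Int) : List Int :=
  let nonspace : List Int :=
    (PySem.List.enumerate original.toList).filterMap
      (fun ic => if ¬ PySem.Chars.isspace ic.2 then some ic.1 else none)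
  let m : Int := nonspace.length
  let L : Nat := pvPrefLen 1 m compact_positions
  -- nonspace[p-1]: always in range for the surviving prefix, so the default is never used
  (compact_positions.take L).map (fun p => (PySem.List.pyGet? nonspace (p - 1)).getD 0 + 1)

-- ===== PRECONDITION & SPEC =====
def Spec_remap_positions_to_original_py (original : String) (compact_positions : List Int) (out : List Int) : Prop := out = remap_positions_to_original_py_alt original compact_positions
instance (original : String) (compact_positions : List Int) (out : List Int) : Decidable (Spec_remap_positions_to_original_py original compact_positions out) := by unfold Spec_remap_positions_to_original_py; infer_instance

-- ===== CLAIM (what is proved, stated in full; the proofs are below) =====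
def Claim_equal_remap_positions_to_original_py : Prop := ∀ (original : String) (compact_positions : List Int), Dom_remap_positions_to_original_py original compact_positions → Spec_remap_positions_to_original_py original compact_positions (remap_positions_to_original_py original compact_positions)

-- ===== LEMMAS AND PROOFS =====

-- pure version of the drain (no accumulator)
def pvDrainP (raw : Int) (ci : Int) (cps : List Int) : List Int × List Int :=
  match cps with
  | [] => ([], [])
  | p :: rest => if ci = p then ((raw + 1) :: (pvDrainP raw ci rest).1, (pvDrainP raw ci rest).2) else ([], p :: rest)

-- A's computation with the characters abstracted away to the list of non-space raw indices
def pvFSpec (ns : List Int) (ci : Int) (cps : List Int) : List Int :=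
  match ns with
  | [] => []
  | r :: ns' =>
    (pvDrainP r (ci + 1) cps).1 ++ pvFSpec ns' (ci + 1) (pvDrainP r (ci + 1) cps).2

-- fused B-side scan
def pvScanB (ns : List Int) (prevv : Int) (cps : List Int) : List Int :=
  match cps with
  | [] => []
  | p :: rest =>
    if prevv ≤ p ∧ p ≤ (ns.length : Int) then
      ((PySem.List.pyGet? ns (p - 1)).getD 0 + 1) :: pvScanB ns p rest
    else []

theorem pvDrainA_eq (raw ci : Int) (cps mapping : List Int) :
    pvDrainA raw ci cps mapping = (mapping ++ (pvDrainP raw ci cps).1, (pvDrainP raw ci cps).2) := by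
  induction cps generalizing mapping with
  | nil => simp [pvDrainA, pvDrainP]
  | cons p rest ih =>
    by_cases h : ci = p
    · subst h; rw [pvDrainA, if_pos rfl, ih]; simp [pvDrainP]
    · simp [pvDrainA, pvDrainP, h]

theorem pvFSpec_nil_cps (ns : List Int) (ci : Int) : pvFSpec ns ci [] = [] := by
  induction ns generalizing ci with
  | nil => rfl
  | cons r ns' ih => simp [pvFSpec, pvDrainP, ih]

def pvNsIdx (chars : List (Int × Char)) : List Int :=
  chars.filterMap (fun ic => if ¬ PySem.Chars.isspace ic.2 then some ic.1 else none)

theorem pvGoA_eq (chars : List (Int × Char)) (ci : Int) (cps mapping : List Int) :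
    pvGoA chars ci cps mapping = mapping ++ pvFSpec (pvNsIdx chars) ci cps := by
  induction chars generalizing ci cps mapping with
  | nil => simp [pvGoA, pvNsIdx, pvFSpec]
  | cons hc rest ih =>
    obtain ⟨raw, c⟩ := hc
    by_cases hs : PySem.Chars.isspace c
    · simp [pvGoA, pvNsIdx, hs, ih]
    · simp only [pvGoA, hs, pvDrainA_eq]
      have hns : pvNsIdx ((raw, c) :: rest) = raw :: pvNsIdx rest := by
        simp [pvNsIdx, hs]
      by_cases he : (pvDrainP raw (ci + 1) cps).2 = []
      · simp [he, hns, pvFSpec, pvFSpec_nil_cps]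
      · simp [he, hns, pvFSpec, ih]

-- blocked head: p out of reach, nothing ever matches again
theorem pvFSpec_blocked (ns : List Int) (ci p : Int) (rest : List Int)
    (h : p ≤ ci ∨ (ci + ns.length : Int) < p) :
    pvFSpec ns ci (p :: rest) = [] := by
  induction ns generalizing ci with
  | nil => rfl
  | cons r ns' ih =>
    have hne : ¬ (ci + 1 = p) := by
      rcases h with h | h
      · omega
      · push_cast [List.length_cons] at h; omega
    simp only [pvFSpec, pvDrainP, if_neg hne, List.nil_append]
    apply ih
    rcases h with h | h
    · left; omega
    · right; push_cast [List.length_cons] at h ⊢; omega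

-- matched head
theorem pvFSpec_matched (ns : List Int) (ci p : Int) (rest : List Int)
    (h1 : ci + 1 ≤ p) (h2 : p ≤ ci + ns.length) :
    pvFSpec ns ci (p :: rest) =
      (ns[(p - ci - 1).toNat]?.getD 0 + 1) :: pvFSpec (ns.drop (p - ci - 1).toNat) (p - 1) rest := by
  induction ns generalizing ci with
  | nil => simp at h2; omega
  | cons r ns' ih =>
    by_cases he : ci + 1 = p
    · have : (p - ci - 1).toNat = 0 := by omega
      simp only [this, List.drop_zero, List.getElem?_cons_zero, Option.getD_some]
      have : pvFSpec (r :: ns') (p - 1) rest =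
          (pvDrainP r p rest).1 ++ pvFSpec ns' p (pvDrainP r p rest).2 := by
        have hp : p - 1 + 1 = p := by omega
        simp only [pvFSpec, hp]
      rw [this]
      simp only [pvFSpec, pvDrainP, he]
      simp
    · have hne : ¬ (ci + 1 = p) := he
      simp only [pvFSpec, pvDrainP, if_neg hne, List.nil_append]
      have h1' : ci + 1 + 1 ≤ p := by omega
      have hlen : (((r :: ns').length : Nat) : Int) = (ns'.length : Int) + 1 := by
        simp [List.length_cons]
      have h2' : p ≤ ci + 1 + ns'.length := by omega
      rw [ih (ci + 1) h1' h2']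
      have hk : (p - ci - 1).toNat = (p - (ci + 1) - 1).toNat + 1 := by omega
      simp [hk]

-- main: A's abstract computation equals the fused B scan
theorem pvFSpec_eq_scan (cps : List Int) (ns : List Int) (d : Nat) (hd : d ≤ ns.length) :
    pvFSpec (ns.drop d) (d : Int) cps = pvScanB ns ((d : Int) + 1) cps := by
  induction cps generalizing d with
  | nil => simp [pvFSpec_nil_cps, pvScanB]
  | cons p rest ih =>
    by_cases h : (d : Int) + 1 ≤ p ∧ p ≤ (ns.length : Int)
    · have h2 : p ≤ (d : Int) + ((ns.drop d).length : Int) := by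
        simp only [List.length_drop]; omega
      rw [pvFSpec_matched _ _ _ _ h.1 h2]
      have hp1 : (p - 1).toNat + 1 = p.toNat := by omega
      have hidx : (p - (d : Int) - 1).toNat = (p - 1).toNat - d := by omega
      have hdrop : (ns.drop d).drop (p - (d : Int) - 1).toNat = ns.drop ((p - 1).toNat) := by
        rw [hidx, List.drop_drop]
        congr 1; omega
      have hget : (ns.drop d)[(p - (d : Int) - 1).toNat]? = ns[(p - 1).toNat]? := by
        rw [hidx, List.getElem?_drop]
        congr 1; omega
      have hcast : ((p - 1).toNat : Int) = p - 1 := by omega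
      have hih := ih ((p - 1).toNat) (by omega)
      rw [hdrop, hget]
      rw [pvScanB, if_pos h]
      have hpg : PySem.List.pyGet? ns (p - 1) = ns[(p - 1).toNat]? := by
        conv_lhs => rw [show p - 1 = (((p - 1).toNat : Nat) : Int) from by omega]
        rw [PySem.List.pyGet?_natCast]
      rw [hpg]
      congr 1
      rw [hcast] at hih
      rw [hih]
      congr 1
      omega
    · have hb : p ≤ (d : Int) ∨ ((d : Int) + ((ns.drop d).length : Int)) < p := by
        simp only [List.length_drop]; omega
      rw [pvFSpec_blocked _ _ _ _ (by exact_mod_cast hb)]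
      rw [pvScanB, if_neg h]

-- B's take/map form equals the fused scan
theorem pvTakeMap_eq_scan (cps : List Int) (ns : List Int) (prevv : Int) :
    (cps.take (pvPrefLen prevv (ns.length : Int) cps)).map
        (fun p => (PySem.List.pyGet? ns (p - 1)).getD 0 + 1)
      = pvScanB ns prevv cps := by
  induction cps generalizing prevv with
  | nil => rfl
  | cons p rest ih =>
    by_cases h : prevv ≤ p ∧ p ≤ (ns.length : Int)
    · simp [pvPrefLen, pvScanB, h, Nat.add_comm, ih]
    · simp [pvPrefLen, pvScanB, h]

-- ===== VERDICT (by name: the statement is the Claim_ definition above) =====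
theorem remap_positions_to_original_py_spec : Claim_equal_remap_positions_to_original_py := by
  intro original cps _
  unfold Spec_remap_positions_to_original_py
  unfold remap_positions_to_original_py remap_positions_to_original_py_alt
  by_cases hc : cps = []
  · simp [hc, pvPrefLen]
  · simp only [if_neg hc, pvGoA_eq, List.nil_append]
    have h0 := pvFSpec_eq_scan cps (pvNsIdx (PySem.List.enumerate original.toList)) 0 (Nat.zero_le _)
    simp only [List.drop_zero, Nat.cast_zero, zero_add] at h0
    rw [show pvNsIdx (PySem.List.enumerate original.toList)
        = (PySem.List.enumerate original.toList).filterMap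
            (fun ic => if ¬ PySem.Chars.isspace ic.2 then some ic.1 else none) from rfl] at h0 ⊢
    rw [h0, ← pvTakeMap_eq_scan]
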